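-- pv_equiv track=rewrite | github.com/Shrithu10/Leet-code | 2298-count-integers-with-even-digit-sum/count-integers-with-even-digit-sum.py | countEven
-- ===== SOURCE A (Python) =====
-- def countEven(num: int) -> int:
--     c=0
--     for i in range(1,num+1):
--         s=str(i)
--         sum=0
--         for i in s:
--             sum=sum+int(i)
--         if sum%2==0:
--             c=c+1
--     return c
-- ===== SOURCE B (Python) =====
-- def countEven(num: int) -> int:
--     # Closed form: among 1..num the count is num//2 when digitsum(num) is even,
--     # else (num-1)//2.
--     if num <= 0:
--         return 0
--     s = 0
--     n = num
--     while n: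
--         s += n % 10
--         n //= 10
--     return num // 2 if s % 2 == 0 else (num - 1) // 2
-- ===== Notes on version B (the rewrite author's own statement) =====
-- stated objective: faster
-- what changed: Replaces A's loop over every integer from one to num (each with a string-based digit sum) by a closed form: half of num, rounded down one step further when num's own digit sum is odd, computed from a single arithmetic digit-sum pass over num.
import Mathlib
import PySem

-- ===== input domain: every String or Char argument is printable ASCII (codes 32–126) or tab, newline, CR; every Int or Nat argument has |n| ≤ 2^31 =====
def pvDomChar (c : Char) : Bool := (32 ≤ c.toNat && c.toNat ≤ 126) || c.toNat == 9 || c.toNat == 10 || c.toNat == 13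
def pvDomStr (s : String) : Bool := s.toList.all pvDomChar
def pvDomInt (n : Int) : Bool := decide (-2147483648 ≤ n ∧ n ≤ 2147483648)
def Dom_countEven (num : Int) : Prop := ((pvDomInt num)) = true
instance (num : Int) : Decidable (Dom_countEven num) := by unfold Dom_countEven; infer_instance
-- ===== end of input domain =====

-- B replaces A's loop over all of 1..num by a closed form from the parity of num's own digit sum (objective: faster, asymptotic).

-- ===== PORT A =====
-- loop i in 1..num; digit sum of i via its decimal string (int(ch) = PySem.Int.ofChars? [ch],
-- never none here since i ≥ 1 has only digit characters)
def countEven (num : Int) : Int :=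
  (PySem.List.pyRange 1 (num + 1) 1).foldl
    (fun c i =>
      let s := (PySem.Int.toChars i).foldl
        (fun sum ch => sum + (PySem.Int.ofChars? [ch]).getD 0) 0
      if PySem.Int.mod s 2 = 0 then c + 1 else c)
    0

-- ===== PORT B =====
-- Source B's 'while n: s += n % 10; n //= 10' on a positive n, as structural recursion
def bDigitSum : Nat → Nat
  | 0 => 0
  | n + 1 => (n + 1) % 10 + bDigitSum ((n + 1) / 10)
decreasing_by exact Nat.div_lt_self (Nat.succ_pos n) (by norm_num)

def countEven_alt (num : Int) : Int :=
  if num ≤ 0 then 0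
  else
    let s : Int := (bDigitSum num.toNat : Int)
    if PySem.Int.mod s 2 = 0 then PySem.Int.floordiv num 2
    else PySem.Int.floordiv (num - 1) 2

-- ===== PRECONDITION & SPEC =====
def Spec_countEven (num : Int) (out : Int) : Prop := out = countEven_alt num
instance (num : Int) (out : Int) : Decidable (Spec_countEven num out) := by unfold Spec_countEven; infer_instance

-- ===== CLAIM (what is proved, stated in full; the proofs are below) =====
def Claim_equal_countEven : Prop := ∀ (num : Int), Dom_countEven num → Spec_countEven num (countEven num)

-- ===== LEMMAS AND PROOFS =====

-- value of int(ch) for a decimal digit character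
lemma pv_val_digitChar (m : Nat) (h : m < 10) :
    (PySem.Int.ofChars? [Nat.digitChar m]).getD 0 = (m : Int) := by
  interval_cases m <;> decide

lemma pv_foldl_val (l : List Char) (a : Int) :
    l.foldl (fun sum ch => sum + (PySem.Int.ofChars? [ch]).getD 0) a
      = a + (l.map (fun ch => (PySem.Int.ofChars? [ch]).getD 0)).sum := by
  induction l generalizing a with
  | nil => simp
  | cons c t ih => simp [ih]; ring

lemma pv_sum_toDigitsCore (fuel : Nat) : ∀ (n : Nat) (acc : List Char), n < fuel →
    ((Nat.toDigitsCore 10 fuel n acc).map (fun ch => (PySem.Int.ofChars? [ch]).getD 0)).sum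
      = (bDigitSum n : Int)
        + ((acc.map (fun ch => (PySem.Int.ofChars? [ch]).getD 0)).sum) := by
  induction fuel with
  | zero => intro n acc h; omega
  | succ f ih =>
    intro n acc h
    rw [Nat.toDigitsCore]
    by_cases h0 : n / 10 = 0
    · simp only [h0]
      have hm : n % 10 < 10 := Nat.mod_lt _ (by norm_num)
      rcases n with _ | m
      · simp [bDigitSum, pv_val_digitChar _ hm]
      · rw [bDigitSum]
        simp [pv_val_digitChar _ hm, h0, bDigitSum]
    · simp only [if_neg h0]
      have hlt : n / 10 < f := by
        have h1 : 0 < n := by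
          rcases Nat.eq_zero_or_pos n with h' | h'
          · exact absurd (by simp [h']) h0
          · exact h'
        have := Nat.div_lt_self h1 (show 1 < 10 by norm_num)
        omega
      rw [ih _ _ hlt]
      have hm : n % 10 < 10 := Nat.mod_lt _ (by norm_num)
      rcases n with _ | m
      · simp at h0
      · rw [bDigitSum]
        simp [pv_val_digitChar _ hm]
        ring

-- digit-char sum of str(m) (m : Nat) equals the numeric digit sum
lemma pv_csum_eq (m : Nat) :
    (PySem.Int.toChars (m : Int)).foldl
        (fun sum ch => sum + (PySem.Int.ofChars? [ch]).getD 0) 0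
      = (bDigitSum m : Int) := by
  have hnn : ¬ ((m : Int) < 0) := by omega
  rw [PySem.Int.toChars, if_neg hnn, pv_foldl_val]
  have hm : ((m : Int)).toNat = m := Int.toNat_natCast m
  rw [hm, Nat.toDigits, pv_sum_toDigitsCore (m + 1) m [] (Nat.lt_succ_self m)]
  simp

-- no carry when incrementing an even number: the digit sum goes up by exactly 1
lemma pv_bds_succ_even (n : Nat) (h : n % 2 = 0) :
    bDigitSum (n + 1) = bDigitSum n + 1 := by
  have h9 : n % 10 < 9 := by omega
  have hmod : (n + 1) % 10 = n % 10 + 1 := by omega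
  have hdiv : (n + 1) / 10 = n / 10 := by omega
  rcases n with _ | m
  · simp [bDigitSum]
  · rw [bDigitSum, bDigitSum, hmod, hdiv]
    omega

-- one step of the closed form: adding the term for k+1
lemma pv_step (k a b : Nat) (hflip : k % 2 = 0 → a = b + 1) (h0 : k = 0 → b = 0) :
    (if ((a % 2 : Nat) : Int) = 0
      then (if b % 2 = 0 then ((k / 2 : Nat) : Int) else (((k - 1) / 2 : Nat) : Int)) + 1
      else (if b % 2 = 0 then ((k / 2 : Nat) : Int) else (((k - 1) / 2 : Nat) : Int)))
    = if a % 2 = 0 then (((k + 1) / 2 : Nat) : Int) else ((((k + 1) - 1) / 2 : Nat) : Int) := by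
  by_cases hk : k % 2 = 0
  · have hf := hflip hk
    rcases Nat.eq_zero_or_pos k with hz | hp
    · subst hz
      rw [h0 rfl] at hf
      subst hf
      norm_num
    · split_ifs <;> omega
  · split_ifs <;> omega

lemma pv_mod2_cast (j : Nat) :
    PySem.Int.mod ((j : Nat) : Int) 2 = (((j % 2 : Nat)) : Int) := by
  rw [PySem.Int.mod_eq_emod_of_pos (by norm_num : (0 : Int) < 2)]
  omega

-- the value of A's loop on 1..n, closed form
lemma pv_main (n : Nat) :
    countEven (n : Int)
      = (if bDigitSum n % 2 = 0 then ((n / 2 : Nat) : Int) else (((n - 1) / 2 : Nat) : Int)) := by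
  induction n with
  | zero =>
    rw [show ((0 : Nat) : Int) = 0 from rfl]
    unfold countEven
    rw [PySem.List.pyRange_one_eq_nil (show (0 : Int) + 1 ≤ 1 by norm_num)]
    simp [bDigitSum]
  | succ k ih =>
    have hcast : ((k + 1 : Nat) : Int) = (k : Int) + 1 := by push_cast; ring
    have hsplit : PySem.List.pyRange 1 ((k : Int) + 1 + 1) 1
        = PySem.List.pyRange 1 ((k : Int) + 1) 1 ++ [(k : Int) + 1] :=
      PySem.List.pyRange_one_succ_right (show (1 : Int) ≤ (k : Int) + 1 by omega)
    unfold countEven at ih ⊢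
    rw [hcast, hsplit]
    simp only [List.foldl_append, List.foldl_cons, List.foldl_nil] at ih ⊢
    rw [ih, ← hcast, pv_csum_eq, pv_mod2_cast]
    exact pv_step k (bDigitSum (k + 1)) (bDigitSum k) (pv_bds_succ_even k)
      (by intro h; subst h; simp [bDigitSum])

-- ===== VERDICT (by name: the statement is the Claim_ definition above) =====
theorem countEven_spec : Claim_equal_countEven := by
  intro num _
  unfold Spec_countEven countEven_alt
  by_cases hle : num ≤ 0
  · rw [if_pos hle]
    unfold countEven
    rw [PySem.List.pyRange_one_eq_nil (show num + 1 ≤ 1 by omega)]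
    rfl
  · rw [if_neg hle]
    set n := num.toNat with hdef
    have h1 : 1 ≤ n := by omega
    have hnum : num = ((n : Nat) : Int) := by omega
    rw [hnum, pv_main n]
    simp only [PySem.Int.mod_eq_emod_of_pos (by norm_num : (0 : Int) < 2),
               PySem.Int.floordiv_eq_ediv_of_pos (by norm_num : (0 : Int) < 2)]
    by_cases hb : bDigitSum n % 2 = 0
    · have hbi : ((bDigitSum n : Nat) : Int) % 2 = 0 := by omega
      rw [if_pos hbi, if_pos hb]
      omega
    · have hbi : ¬ ((bDigitSum n : Nat) : Int) % 2 = 0 := by omega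
      rw [if_neg hbi, if_neg hb]
      omega
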